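-- pv_equiv track=rewrite | github.com/aravinduv/GoMoku | gomoku.py | getColumnBottom
-- ===== SOURCE A (Python) =====
-- def getColumnBottom(xval,yval,maxSize):
-- 	list8 = []
-- 	while (xval <= (maxSize-1)):
-- 		if ((xval + 1) <= (maxSize-1)):
-- 			list8.append(str(xval+1)+","+str(yval))
-- 			xval = xval + 1
-- 		else:
-- 			break
--
-- 	if len(list8) != 0:
-- 		return list8[-1]
-- 	else:
-- 		list8.append(str(xval)+","+str(yval))
-- 		return list8[-1]
-- ===== SOURCE B (Python) =====
-- def getColumnBottom(xval, yval, maxSize):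
--     return str(max(xval, maxSize - 1)) + "," + str(yval)
-- ===== Notes on version B (the rewrite author's own statement) =====
-- stated objective: faster
-- what changed: Replaced the O(maxSize-xval) loop that appends every intermediate coordinate string with the closed form str(max(xval, maxSize-1)) + ',' + str(yval).
import Mathlib
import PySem

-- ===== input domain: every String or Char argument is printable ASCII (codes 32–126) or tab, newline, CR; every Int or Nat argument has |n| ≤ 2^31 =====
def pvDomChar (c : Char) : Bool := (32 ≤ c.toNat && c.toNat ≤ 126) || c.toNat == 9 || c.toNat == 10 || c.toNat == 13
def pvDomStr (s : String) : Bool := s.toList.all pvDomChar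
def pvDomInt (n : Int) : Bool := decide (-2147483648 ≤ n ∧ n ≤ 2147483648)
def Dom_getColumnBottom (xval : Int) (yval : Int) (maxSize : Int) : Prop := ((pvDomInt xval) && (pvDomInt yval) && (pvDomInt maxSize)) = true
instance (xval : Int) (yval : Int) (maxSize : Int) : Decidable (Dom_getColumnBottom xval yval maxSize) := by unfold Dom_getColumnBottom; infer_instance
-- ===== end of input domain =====

-- B replaces A's element-by-element loop with the closed form str(max(xval, maxSize-1)) + "," + str(yval); objective: faster.


-- ===== PORT A =====
-- the while loop: returns the final xval and list8 built as a reversed accumulator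
-- (each append is a cons; the caller reverses, so the list is A's list8)
def getColumnBottomLoop (xval : Int) (yval : Int) (maxSize : Int) (list8R : List String) : Int × List String :=
  if xval ≤ maxSize - 1 then
    if xval + 1 ≤ maxSize - 1 then
      getColumnBottomLoop (xval + 1) yval maxSize
        ((PySem.Int.toStr (xval + 1) ++ "," ++ PySem.Int.toStr yval) :: list8R)
    else (xval, list8R)
  else (xval, list8R)
termination_by (maxSize - 1 - xval).toNat
decreasing_by omega

def getColumnBottom (xval : Int) (yval : Int) (maxSize : Int) : String :=
  let r := getColumnBottomLoop xval yval maxSize []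
  let list8 := r.2.reverse
  if list8.length ≠ 0 then
    list8.getLastD ""          -- list8[-1] on a nonempty list
  else
    ((list8 ++ [PySem.Int.toStr r.1 ++ "," ++ PySem.Int.toStr yval]).getLastD "")

-- ===== PORT B =====
def getColumnBottom_alt (xval : Int) (yval : Int) (maxSize : Int) : String :=
  PySem.Int.toStr (max xval (maxSize - 1)) ++ "," ++ PySem.Int.toStr yval

-- ===== PRECONDITION & SPEC =====
def Spec_getColumnBottom (xval : Int) (yval : Int) (maxSize : Int) (out : String) : Prop := out = getColumnBottom_alt xval yval maxSize
instance (xval : Int) (yval : Int) (maxSize : Int) (out : String) : Decidable (Spec_getColumnBottom xval yval maxSize out) := by unfold Spec_getColumnBottom; infer_instance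

-- ===== CLAIM (what is proved, stated in full; the proofs are below) =====
def Claim_equal_getColumnBottom : Prop := ∀ (xval : Int) (yval : Int) (maxSize : Int), Dom_getColumnBottom xval yval maxSize → Spec_getColumnBottom xval yval maxSize (getColumnBottom xval yval maxSize)

-- ===== LEMMAS AND PROOFS =====

-- When the loop runs at least once, the last appended element (head of the reversed
-- accumulator) is str(maxSize-1)+","+str(yval).
theorem loop_runs (yval maxSize : Int) :
    ∀ (xval : Int) (l : List String), xval + 1 ≤ maxSize - 1 →
      (getColumnBottomLoop xval yval maxSize l).2.headD "" =
        PySem.Int.toStr (maxSize - 1) ++ "," ++ PySem.Int.toStr yval ∧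
      (getColumnBottomLoop xval yval maxSize l).2.length ≠ 0 := by
  intro xval
  induction h : (maxSize - 1 - xval).toNat using Nat.strong_induction_on generalizing xval with
  | _ n ih =>
    intro l hx
    rw [getColumnBottomLoop]
    have hle : xval ≤ maxSize - 1 := by omega
    simp only [if_pos hle, if_pos hx]
    by_cases h2 : xval + 1 + 1 ≤ maxSize - 1
    · exact ih (maxSize - 1 - (xval + 1)).toNat (by omega) (xval + 1) rfl _ h2
    · have hx1 : xval + 1 = maxSize - 1 := by omega
      rw [getColumnBottomLoop]
      simp only [if_pos (by omega : xval + 1 ≤ maxSize - 1), if_neg h2]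
      constructor
      · simp [hx1]
      · simp

theorem loop_stops (xval yval maxSize : Int) (l : List String)
    (h : ¬ xval + 1 ≤ maxSize - 1) :
    getColumnBottomLoop xval yval maxSize l = (xval, l) := by
  rw [getColumnBottomLoop]
  by_cases h1 : xval ≤ maxSize - 1 <;> simp [h1, h]

-- ===== VERDICT (by name: the statement is the Claim_ definition above) =====
theorem getColumnBottom_spec : Claim_equal_getColumnBottom := by
  intro xval yval maxSize _
  unfold Spec_getColumnBottom getColumnBottom getColumnBottom_alt
  by_cases h : xval + 1 ≤ maxSize - 1
  · obtain ⟨h1, h2⟩ := loop_runs yval maxSize xval [] h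
    have h2' : (getColumnBottomLoop xval yval maxSize []).2.reverse.length ≠ 0 := by
      simpa using h2
    have h1' : (getColumnBottomLoop xval yval maxSize []).2.reverse.getLastD "" =
        PySem.Int.toStr (maxSize - 1) ++ "," ++ PySem.Int.toStr yval := by
      cases hc : (getColumnBottomLoop xval yval maxSize []).2 with
      | nil => simp [hc] at h2
      | cons a t => simpa [hc] using (by simpa [hc] using h1 : a = _)
    simp only [if_pos h2', h1']
    have : max xval (maxSize - 1) = maxSize - 1 := by omega
    rw [this]
  · rw [loop_stops xval yval maxSize [] h]
    simp only [List.reverse_nil, List.length_nil, ne_eq, not_true_eq_false, if_neg,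
      not_false_eq_true]
    have : max xval (maxSize - 1) = xval := by omega
    rw [this]
    simp
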